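-- pv_equiv track=rewrite | github.com/wubeZ/leetcode | 2380-time-needed-to-rearrange-a-binary-string/2380-time-needed-to-rearrange-a-binary-string.py | secondsToRemoveOccurrences
-- ===== SOURCE A (Python) =====
-- def secondsToRemoveOccurrences(s: str) -> int:
--     count = 0
--     s = list(s)
--     prev = 0
--     ans = 0
--     while True:
--         i = 1
--         while i < len(s):
--             if s[i-1] == "0" and s[i] == "1":
--                 s[i-1], s[i] = s[i], s[i-1]
--                 count += 1
--                 i += 2
--             else:
--                 i += 1
--
--         if count == prev:
--             break
--         ans += 1
--         prev = count
--
--     return ans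
-- ===== SOURCE B (Python) =====
-- def secondsToRemoveOccurrences(s: str) -> int:
--     best = 0
--     cur = 0
--     zeros = 0
--     for ch in s:
--         if ch == '0':
--             zeros += 1
--         elif ch == '1':
--             if zeros > 0:
--                 cur = max(cur + 1, zeros)
--                 if cur > best:
--                     best = cur
--         else:
--             zeros = 0
--             cur = 0
--     return best
-- ===== Notes on version B (the rewrite author's own statement) =====
-- stated objective: faster
-- what changed: replaces the repeat-until-fixpoint parallel-swap simulation with a single left-to-right pass that tracks the number of zero characters seen so far and updates time = max(time+1, zeros) at each one character (state reset at non-binary characters), returning the maximum over segments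
import Mathlib
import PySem

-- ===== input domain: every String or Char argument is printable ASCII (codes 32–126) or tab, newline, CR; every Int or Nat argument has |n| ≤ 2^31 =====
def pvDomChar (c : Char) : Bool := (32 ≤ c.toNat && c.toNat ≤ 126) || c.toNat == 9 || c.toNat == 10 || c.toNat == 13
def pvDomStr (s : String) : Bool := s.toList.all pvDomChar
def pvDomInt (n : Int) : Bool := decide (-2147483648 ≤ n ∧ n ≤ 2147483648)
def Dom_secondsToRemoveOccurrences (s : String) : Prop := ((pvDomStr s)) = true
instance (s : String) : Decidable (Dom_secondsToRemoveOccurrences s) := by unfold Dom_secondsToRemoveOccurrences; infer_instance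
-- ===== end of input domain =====

-- B replaces A's round-by-round parallel-swap simulation by one linear pass (measured faster; proof below shows equal return values).

-- ===== PORT A =====
-- inversion count of the char list ('0' before a later '1'); used only as a fuel
-- bound for A's `while True` loop (each productive round removes ≥ 1 inversion).
def pvOnesA (l : List Char) : Nat :=
  match l with
  | [] => 0
  | c :: t => (if c = '1' then 1 else 0) + pvOnesA t

def pvInvA (l : List Char) : Nat :=
  match l with
  | [] => 0
  | c :: t => (if c = '0' then pvOnesA t else 0) + pvInvA t

-- inner `while i < len(s)` loop of A: scans with index i, swapping s[i-1],s[i]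
def pvInnerA (l : List Char) (i : Int) (count : Int) : List Char × Int :=
  if h : i < (l.length : Int) then
    if PySem.List.pyGetD l (i - 1) ' ' = '0' ∧ PySem.List.pyGetD l i ' ' = '1' then
      pvInnerA
        (PySem.List.pySetD (PySem.List.pySetD l (i - 1) (PySem.List.pyGetD l i ' '))
          i (PySem.List.pyGetD l (i - 1) ' '))
        (i + 2) (count + 1)
    else
      pvInnerA l (i + 1) count
  else
    (l, count)
termination_by ((l.length : Int) - i).toNat
decreasing_by
  · simp only [PySem.List.length_pySetD]; omega
  · omega

-- outer `while True` loop of A (fuel makes it total; pvInvA l + 1 rounds always suffice)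
def pvOuterA (fuel : Nat) (l : List Char) (count prev ans : Int) : Int :=
  match fuel with
  | 0 => ans
  | fuel + 1 =>
    let r := pvInnerA l 1 count
    if r.2 = prev then ans
    else pvOuterA fuel r.1 r.2 r.2 (ans + 1)

def secondsToRemoveOccurrences (s : String) : Int :=
  pvOuterA (pvInvA s.toList + 1) s.toList 0 0 0

-- ===== PORT B =====
-- one step of B's single pass: state (best, cur, zeros)
def pvStepB (st : Int × Int × Int) (ch : Char) : Int × Int × Int :=
  if ch = '0' then (st.1, st.2.1, st.2.2 + 1)
  else if ch = '1' then
    if st.2.2 > 0 then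
      let c := max (st.2.1 + 1) st.2.2
      ((if c > st.1 then c else st.1), c, st.2.2)
    else st
  else (st.1, 0, 0)

def secondsToRemoveOccurrences_alt (s : String) : Int :=
  (s.toList.foldl pvStepB (0, 0, 0)).1

-- ===== PRECONDITION & SPEC =====
def Spec_secondsToRemoveOccurrences (s : String) (out : Int) : Prop := out = secondsToRemoveOccurrences_alt s
instance (s : String) (out : Int) : Decidable (Spec_secondsToRemoveOccurrences s out) := by unfold Spec_secondsToRemoveOccurrences; infer_instance

-- ===== CLAIM (what is proved, stated in full; the proofs are below) =====
def Claim_equal_secondsToRemoveOccurrences : Prop := ∀ (s : String), Dom_secondsToRemoveOccurrences s → Spec_secondsToRemoveOccurrences s (secondsToRemoveOccurrences s)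

-- ===== LEMMAS AND PROOFS =====

-- one parallel round of swaps, written structurally
def pvRound (l : List Char) : List Char :=
  match l with
  | [] => []
  | [c] => [c]
  | a :: b :: r => if a = '0' ∧ b = '1' then '1' :: '0' :: pvRound r else a :: pvRound (b :: r)

-- number of swaps that round performs
def pvSwaps (l : List Char) : Nat :=
  match l with
  | [] => 0
  | [_] => 0
  | a :: b :: r => if a = '0' ∧ b = '1' then pvSwaps r + 1 else pvSwaps (b :: r)

lemma pvRound_of_no_swap (l : List Char) (h : pvSwaps l = 0) : pvRound l = l := by
  fun_induction pvRound l with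
  | case1 => rfl
  | case2 => rfl
  | case3 a b r hab ih =>
    rw [pvSwaps] at h; simp [hab] at h
  | case4 a b r hab ih =>
    rw [pvSwaps] at h; simp [hab] at h
    simp [ih h]

lemma pvOnesA_round (l : List Char) : pvOnesA (pvRound l) = pvOnesA l := by
  fun_induction pvRound l with
  | case1 => rfl
  | case2 => rfl
  | case3 a b r hab ih => simp [pvOnesA, hab.1, hab.2, ih]
  | case4 a b r hab ih => simp [pvOnesA, ih]

lemma pvInvA_round (l : List Char) : pvInvA l = pvSwaps l + pvInvA (pvRound l) := by
  fun_induction pvRound l with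
  | case1 => rfl
  | case2 c => simp [pvSwaps, pvInvA]
  | case3 a b r hab ih =>
    rw [pvSwaps]
    simp [pvInvA, pvOnesA, hab.1, hab.2, pvOnesA_round, ih]
    omega
  | case4 a b r hab ih =>
    rw [pvSwaps, if_neg hab, pvInvA]
    conv_rhs => rw [pvInvA]
    rw [pvOnesA_round, ih]
    omega

lemma pvGet0 (pre ys : List Char) (y d : Char) :
    PySem.List.pyGetD (pre ++ y :: ys) ((pre.length : Int)) d = y := by
  rw [PySem.List.pyGetD_natCast]
  simp [List.getD_eq_getElem?_getD]

lemma pvGet1 (pre ys : List Char) (y z d : Char) :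
    PySem.List.pyGetD (pre ++ y :: z :: ys) ((pre.length : Int) + 1) d = z := by
  have e : ((pre.length : Int) + 1) = ((pre.length + 1 : Nat) : Int) := by push_cast; ring
  rw [e, PySem.List.pyGetD_natCast]
  simp [List.getD_eq_getElem?_getD, List.getElem?_append_right]

lemma pvSet0 (pre ys : List Char) (y v : Char) :
    PySem.List.pySetD (pre ++ y :: ys) ((pre.length : Int)) v = pre ++ v :: ys := by
  rw [PySem.List.pySetD_natCast]
  simp

lemma pvSet1 (pre ys : List Char) (y z v : Char) :
    PySem.List.pySetD (pre ++ y :: z :: ys) ((pre.length : Int) + 1) v = pre ++ y :: v :: ys := by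
  have e : ((pre.length : Int) + 1) = ((pre.length + 1 : Nat) : Int) := by push_cast; ring
  rw [e, PySem.List.pySetD_natCast]
  simp

-- A's inner loop, started at index pre.length + 1, performs one parallel round on the tail
lemma pvInnerA_spec (rest pre : List Char) (count : Int) :
    pvInnerA (pre ++ rest) ((pre.length : Int) + 1) count
      = (pre ++ pvRound rest, count + (pvSwaps rest : Int)) := by
  induction rest using pvRound.induct generalizing pre count with
  | case1 =>
    rw [pvInnerA, dif_neg (by simp)]
    simp [pvRound, pvSwaps]
  | case2 c =>
    rw [pvInnerA, dif_neg (by simp)]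
    simp [pvRound, pvSwaps]
  | case3 a b r hab ih =>
    obtain ⟨rfl, rfl⟩ := hab
    rw [pvInnerA, dif_pos (by simp; try omega)]
    simp only [add_sub_cancel_right, pvGet0, pvGet1, pvSet0, pvSet1]
    rw [if_pos (by constructor <;> trivial)]
    have e1 : pre ++ '1' :: '0' :: r = (pre ++ ['1', '0']) ++ r := by simp
    have e2 : ((pre.length : Int) + 1 + 2) = (((pre ++ ['1', '0']).length : Int) + 1) := by
      simp; try omega
    rw [e1, e2, ih]
    simp [pvRound, pvSwaps]
    omega
  | case4 a b r hab ih =>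
    rw [pvInnerA, dif_pos (by simp; try omega)]
    simp only [add_sub_cancel_right, pvGet0, pvGet1]
    rw [if_neg hab]
    have e1 : pre ++ a :: b :: r = (pre ++ [a]) ++ b :: r := by simp
    have e2 : ((pre.length : Int) + 1 + 1) = (((pre ++ [a]).length : Int) + 1) := by
      simp; try omega
    rw [e1, e2, ih]
    rw [pvRound, if_neg hab, pvSwaps, if_neg hab]
    simp

lemma pvStepB_zero (b c z : Int) : pvStepB (b, c, z) '0' = (b, c, z + 1) := by
  simp [pvStepB]

lemma pvStepB_one_pos (b c z : Int) (h : 0 < z) :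
    pvStepB (b, c, z) '1' = (max b (max (c + 1) z), max (c + 1) z, z) := by
  simp only [pvStepB]
  split_ifs <;> simp_all [Prod.mk.injEq] <;> omega

lemma pvStepB_one_nonpos (b c z : Int) (h : ¬ 0 < z) : pvStepB (b, c, z) '1' = (b, c, z) := by
  simp only [pvStepB]
  split_ifs <;> simp_all

lemma pvStepB_other (b c z : Int) (a : Char) (h1 : a ≠ '0') (h2 : a ≠ '1') :
    pvStepB (b, c, z) a = (b, 0, 0) := by
  simp [pvStepB, h1, h2]

-- key invariant: one round decrements B's answer (computed from any valid state) by one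
lemma pvFoldB_round (l : List Char) (best cur zeros : Int)
    (hb : 0 ≤ best) (hc : 0 ≤ cur) (hz : 0 ≤ zeros)
    (h0 : zeros = 0 → cur = 0)
    (hp : l.head? = some '1' → 0 < zeros → zeros ≤ cur) :
    (List.foldl pvStepB (max (best - 1) 0, max (cur - 1) 0, zeros) (pvRound l)).1
      = max ((List.foldl pvStepB (best, cur, zeros) l).1 - 1) 0 := by
  induction l using pvRound.induct generalizing best cur zeros with
  | case1 => simp [pvRound]
  | case2 c =>
    simp only [pvRound, List.foldl]
    by_cases h1 : c = '0'
    · subst h1; rw [pvStepB_zero, pvStepB_zero]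
    · by_cases h2 : c = '1'
      · subst h2
        have hp' : 0 < zeros → zeros ≤ cur := hp (by simp)
        by_cases hzp : 0 < zeros
        · have := hp' hzp
          rw [pvStepB_one_pos _ _ _ hzp, pvStepB_one_pos _ _ _ hzp]
          dsimp only
          simp only [Int.max_def]
          split_ifs <;> omega
        · rw [pvStepB_one_nonpos _ _ _ hzp, pvStepB_one_nonpos _ _ _ hzp]
      · rw [pvStepB_other _ _ _ _ h1 h2, pvStepB_other _ _ _ _ h1 h2]
  | case3 a b r hab ih =>
    obtain ⟨rfl, rfl⟩ := hab
    rw [pvRound, if_pos (by constructor <;> trivial)]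
    simp only [List.foldl]
    have e2 : pvStepB (pvStepB (best, cur, zeros) '0') '1'
        = (max best (max (cur + 1) (zeros + 1)), max (cur + 1) (zeros + 1), zeros + 1) := by
      rw [pvStepB_zero, pvStepB_one_pos _ _ _ (by omega)]
    have e1 : pvStepB (pvStepB (max (best - 1) 0, max (cur - 1) 0, zeros) '1') '0'
        = (max (max best (max (cur + 1) (zeros + 1)) - 1) 0,
           max (max (cur + 1) (zeros + 1) - 1) 0, zeros + 1) := by
      by_cases hzp : 0 < zeros
      · rw [pvStepB_one_pos _ _ _ hzp, pvStepB_zero]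
        refine Prod.ext ?_ (Prod.ext ?_ ?_) <;> simp only [Int.max_def] <;> split_ifs <;> omega
      · have hc0 : cur = 0 := h0 (by omega)
        rw [pvStepB_one_nonpos _ _ _ hzp, pvStepB_zero]
        refine Prod.ext ?_ (Prod.ext ?_ ?_) <;> simp only [Int.max_def] <;> split_ifs <;> omega
    rw [e1, e2]
    exact ih _ _ _ (by omega) (by omega) (by omega) (by omega) (fun _ _ => by omega)
  | case4 a b r hab ih =>
    rw [pvRound, if_neg hab]
    simp only [List.foldl]
    by_cases h1 : a = '0'
    · subst h1
      have hb1 : b ≠ '1' := fun hb1 => hab ⟨rfl, hb1⟩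
      rw [pvStepB_zero, pvStepB_zero]
      exact ih _ _ _ hb hc (by omega) (by omega)
        (fun hh => by simp at hh; exact absurd hh hb1)
    · by_cases h2 : a = '1'
      · subst h2
        by_cases hzp : 0 < zeros
        · have hcz : zeros ≤ cur := hp (by simp) hzp
          have e2 : pvStepB (best, cur, zeros) '1' = (max best (cur + 1), cur + 1, zeros) := by
            rw [pvStepB_one_pos _ _ _ hzp]
            refine Prod.ext ?_ (Prod.ext ?_ ?_) <;> simp only [Int.max_def] <;> split_ifs <;> omega
          have e1 : pvStepB (max (best - 1) 0, max (cur - 1) 0, zeros) '1'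
              = (max (max best (cur + 1) - 1) 0, max ((cur + 1) - 1) 0, zeros) := by
            rw [pvStepB_one_pos _ _ _ hzp]
            refine Prod.ext ?_ (Prod.ext ?_ ?_) <;> simp only [Int.max_def] <;> split_ifs <;> omega
          rw [e1, e2]
          exact ih _ _ _ (by omega) (by omega) hz (by omega) (fun _ _ => by omega)
        · have hz0 : zeros = 0 := by omega
          have hc0 : cur = 0 := h0 hz0
          subst hz0; subst hc0
          rw [pvStepB_one_nonpos _ _ _ (by norm_num), pvStepB_one_nonpos _ _ _ (by norm_num)]
          exact ih best 0 0 hb le_rfl le_rfl (fun _ => rfl) (fun _ h => absurd h (by omega))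
      · rw [pvStepB_other _ _ _ _ h1 h2, pvStepB_other _ _ _ _ h1 h2]
        rw [show ((max (best - 1) 0, (0 : Int), (0 : Int)) : Int × Int × Int)
            = (max (best - 1) 0, max ((0 : Int) - 1) 0, (0 : Int)) by norm_num]
        exact ih best 0 0 hb le_rfl le_rfl (fun _ => rfl) (fun _ h => absurd h (by omega))

lemma pvFoldB_fst_mono (l : List Char) : ∀ st : Int × Int × Int, st.1 ≤ (List.foldl pvStepB st l).1 := by
  induction l with
  | nil => intro st; simp
  | cons a t ih =>
    intro st
    simp only [List.foldl]
    refine le_trans ?_ (ih (pvStepB st a))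
    simp only [pvStepB]
    split_ifs <;> simp_all <;> omega

lemma pvStepB_nonneg (st : Int × Int × Int) (a : Char)
    (hb : 0 ≤ st.1) (hc : 0 ≤ st.2.1) (hz : 0 ≤ st.2.2) :
    0 ≤ (pvStepB st a).1 ∧ 0 ≤ (pvStepB st a).2.1 ∧ 0 ≤ (pvStepB st a).2.2 := by
  simp only [pvStepB]
  split_ifs <;> simp_all <;> omega

lemma pvFoldB_pos (l : List Char) (best cur zeros : Int)
    (hb : 0 ≤ best) (hc : 0 ≤ cur) (hz : 0 ≤ zeros) (h : 0 < pvSwaps l) :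
    1 ≤ (List.foldl pvStepB (best, cur, zeros) l).1 := by
  induction l using pvSwaps.induct generalizing best cur zeros with
  | case1 => simp [pvSwaps] at h
  | case2 c => simp [pvSwaps] at h
  | case3 a b r hab ih =>
    obtain ⟨rfl, rfl⟩ := hab
    simp only [List.foldl]
    rw [pvStepB_zero, pvStepB_one_pos _ _ _ (by omega)]
    refine le_trans ?_ (pvFoldB_fst_mono r _)
    dsimp only
    simp only [Int.max_def]
    split_ifs <;> omega
  | case4 a b r hab ih =>
    rw [pvSwaps, if_neg hab] at h
    simp only [List.foldl]
    have hn := pvStepB_nonneg (best, cur, zeros) a hb hc hz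
    rcases hst : pvStepB (best, cur, zeros) a with ⟨b', c', z'⟩
    rw [hst] at hn
    exact ih b' c' z' hn.1 hn.2.1 hn.2.2 h

lemma pvOuterA_spec (fuel : Nat) (l : List Char) (count ans : Int)
    (hf : pvInvA l < fuel) :
    pvOuterA fuel l count count ans = ans + (List.foldl pvStepB (0, 0, 0) l).1 := by
  induction fuel generalizing l count ans with
  | zero => exact absurd hf (by omega)
  | succ n ih =>
    have hin : pvInnerA l 1 count = (pvRound l, count + (pvSwaps l : Int)) := by
      simpa using pvInnerA_spec l [] count
    have hd := pvFoldB_round l 0 0 0 le_rfl le_rfl le_rfl (fun _ => rfl)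
      (fun _ h => absurd h (by omega))
    norm_num at hd
    simp only [pvOuterA, hin]
    by_cases hs : pvSwaps l = 0
    · rw [if_pos (by push_cast [hs]; ring)]
      rw [pvRound_of_no_swap l hs] at hd
      omega
    · rw [if_neg (by omega)]
      have hlt : pvInvA (pvRound l) < n := by
        have := pvInvA_round l
        omega
      rw [ih (pvRound l) _ (ans + 1) hlt]
      have hpos := pvFoldB_pos l 0 0 0 le_rfl le_rfl le_rfl (by omega)
      omega

-- ===== VERDICT (by name: the statement is the Claim_ definition above) =====
theorem secondsToRemoveOccurrences_spec : Claim_equal_secondsToRemoveOccurrences := by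
  intro s _
  show _ = _
  unfold secondsToRemoveOccurrences secondsToRemoveOccurrences_alt
  rw [pvOuterA_spec (pvInvA s.toList + 1) s.toList 0 0 (by omega)]
  ring
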